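-- pv_equiv track=rewrite | github.com/davidlee/spec-driver | supekku/scripts/sync_specs.py | parse_language_targets
-- ===== SOURCE A (Python) =====
-- def parse_language_targets(targets: list[str]) -> dict[str, list[str]]:
--   """Parse language-prefixed targets into language-specific lists.
--
--   Args:
--       targets: List of targets, optionally prefixed with language
--                (e.g., "go:internal/foo", "python:module.py")
--
--   Returns:
--       Dictionary mapping language to list of identifiers
--
--   """
--   language_targets = {}
--
--   for target in targets:
--     if ":" in target:
--       # Language-prefixed target
--       language, identifier = target.split(":", 1)
--       if language not in language_targets:
--         language_targets[language] = []
--       language_targets[language].append(identifier)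
--     else:
--       # Unspecified language - let adapters determine support
--       # Add to 'auto' key for later resolution
--       if "auto" not in language_targets:
--         language_targets["auto"] = []
--       language_targets["auto"].append(target)
--
--   return language_targets
-- ===== SOURCE B (Python) =====
-- def parse_language_targets(targets: list[str]) -> dict[str, list[str]]:
--   """Parse language-prefixed targets into language-specific lists (pairs -> dedup keys -> per-key gather)."""
--   pairs = [tuple(t.split(":", 1)) if ":" in t else ("auto", t) for t in targets]
--   langs = list(dict.fromkeys(lang for lang, _ in pairs))
--   return {lang: [ident for l, ident in pairs if l == lang] for lang in langs}
-- ===== Notes on version B (the rewrite author's own statement) =====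
-- stated objective: alternative
-- what changed: Replaces A's single incremental scan that conditionally inserts empty lists and appends into a dict, by a pipeline: map each target to a (language, identifier) pair, dedup the languages in first-occurrence order, then gather each language's identifiers with a per-language filter.
import Mathlib
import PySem

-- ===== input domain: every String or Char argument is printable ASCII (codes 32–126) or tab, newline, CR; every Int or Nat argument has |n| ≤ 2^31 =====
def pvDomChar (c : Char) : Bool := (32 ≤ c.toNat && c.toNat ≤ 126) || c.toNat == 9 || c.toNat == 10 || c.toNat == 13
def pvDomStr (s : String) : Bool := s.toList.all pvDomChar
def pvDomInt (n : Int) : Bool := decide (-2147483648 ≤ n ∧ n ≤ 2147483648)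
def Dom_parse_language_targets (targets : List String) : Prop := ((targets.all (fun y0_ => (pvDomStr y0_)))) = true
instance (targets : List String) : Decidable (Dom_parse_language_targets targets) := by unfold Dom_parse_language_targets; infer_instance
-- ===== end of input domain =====

-- B replaces A's incremental dict scan-and-append by a pairs → dedup-keys → per-key gather pipeline (objective: alternative, same cost class).

-- Shared parsing of one target: ("lang", "ident") from 'lang:ident', else ("auto", target).
-- t.split(":", 1) with ":" in t always yields exactly two pieces; the wildcard arm is unreachable and only makes the match total.
def pvPair (t : String) : String × String :=
  if PySem.Str.isIn ":" t then
    match PySem.Str.splitMax? t ":" 1 with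
    | some (language :: identifier :: _) => (language, identifier)
    | _ => ("auto", t)
  else ("auto", t)

-- ===== PORT A =====
def parse_language_targets (targets : List String) : List (String × List String) :=
  (targets.foldl (fun language_targets target =>
    if PySem.Str.isIn ":" target then
      let language := (pvPair target).1
      let identifier := (pvPair target).2
      let d := if language_targets.contains language then language_targets
               else language_targets.insert language []
      d.modify language [] (fun v => v ++ [identifier])
    else
      let d := if language_targets.contains "auto" then language_targets
               else language_targets.insert "auto" []
      d.modify "auto" [] (fun v => v ++ [target]))
    PySem.Dict.empty).items

-- ===== PORT B =====
def parse_language_targets_alt (targets : List String) : List (String × List String) :=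
  let pairs := targets.map pvPair
  let langs := PySem.List.dedup (pairs.map (fun p => p.1))
  langs.map (fun lang => (lang, (pairs.filter (fun p => p.1 == lang)).map (fun p => p.2)))

-- ===== PRECONDITION & SPEC =====
def Spec_parse_language_targets (targets : List String) (out : List (String × List String)) : Prop := out = parse_language_targets_alt targets
instance (targets : List String) (out : List (String × List String)) : Decidable (Spec_parse_language_targets targets out) := by unfold Spec_parse_language_targets; infer_instance

-- ===== CLAIM (what is proved, stated in full; the proofs are below) =====
def Claim_equal_parse_language_targets : Prop := ∀ (targets : List String), Dom_parse_language_targets targets → Spec_parse_language_targets targets (parse_language_targets targets)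

-- ===== LEMMAS AND PROOFS =====

-- ensure-key-then-append collapses to a single modify
lemma pv_insert_insert_self {κ ν : Type} [BEq κ] [LawfulBEq κ] (d : PySem.Dict κ ν) (k : κ) (v v' : ν)
    (h : d.contains k = false) : (d.insert k v).insert k v' = d.insert k v' := by
  apply PySem.Dict.ext
  rw [PySem.Dict.items_insert_of_contains _ _ (by simp [PySem.Dict.contains_insert_self]),
      PySem.Dict.items_insert_of_not_contains _ _ h,
      PySem.Dict.items_insert_of_not_contains _ _ h]
  have hk : ∀ p ∈ d.items, (p.1 == k) = false := by
    intro p hp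
    have hmem : p.1 ∈ d.keys := PySem.Dict.mem_keys_of_mem_items d hp
    by_contra hbe
    have : p.1 = k := by simpa using (Bool.not_eq_false _).mp hbe
    rw [← PySem.Dict.contains_iff_mem_keys, this, h] at hmem
    simp at hmem
  rw [List.map_append]
  congr 1
  · have : d.items.map (fun p => if (p.1 == k) = true then (k, v') else p) = d.items.map id :=
      List.map_congr_left (by intro p hp; simp [hk p hp])
    rw [this, List.map_id]
  · simp

lemma pv_ensure_modify {κ : Type} [BEq κ] [LawfulBEq κ] (d : PySem.Dict κ (List String)) (k : κ) (x : String) :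
    (if d.contains k then d else d.insert k []).modify k [] (fun v => v ++ [x])
      = d.modify k [] (fun v => v ++ [x]) := by
  by_cases h : d.contains k
  · simp [h]
  · have h' : d.contains k = false := by simpa using h
    simp only [h', Bool.false_eq_true, if_false]
    unfold PySem.Dict.modify
    rw [PySem.Dict.getD_insert_self, PySem.Dict.getD_of_not_contains _ _ h',
        pv_insert_insert_self _ _ _ _ h']

-- A's loop body is a single modify keyed by pvPair
lemma pv_stepA_eq (d : PySem.Dict String (List String)) (t : String) :
    (if PySem.Str.isIn ":" t then
      let language := (pvPair t).1
      let identifier := (pvPair t).2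
      let d1 := if d.contains language then d else d.insert language []
      d1.modify language [] (fun v => v ++ [identifier])
    else
      let d1 := if d.contains "auto" then d else d.insert "auto" []
      d1.modify "auto" [] (fun v => v ++ [t]))
    = d.modify (pvPair t).1 [] (fun v => v ++ [(pvPair t).2]) := by
  by_cases h : PySem.Str.isIn ":" t
  · simp only [h, if_pos]
    exact pv_ensure_modify d (pvPair t).1 (pvPair t).2
  · have hp : pvPair t = ("auto", t) := by unfold pvPair; rw [if_neg h]
    rw [if_neg h, hp]
    exact pv_ensure_modify d "auto" t

-- items of a nodup-keyed dict are keys paired with their getD values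
lemma pv_items_eq_keys_map {κ ν : Type} [BEq κ] [LawfulBEq κ] (d : PySem.Dict κ ν) (d0 : ν)
    (h : d.keys.Nodup) : d.items = d.keys.map (fun k => (k, d.getD k d0)) := by
  have hkeys : d.keys = d.items.map (fun p => p.1) := rfl
  rw [hkeys, List.map_map]
  have : d.items.map ((fun k => (k, d.getD k d0)) ∘ fun p => p.1) = d.items.map id := by
    apply List.map_congr_left
    intro p hp
    have hget : d.get? p.1 = some p.2 :=
      PySem.Dict.get?_of_mem_items d (by simpa using hp) h
    have hgd : d.getD p.1 d0 = p.2 := by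
      rw [PySem.Dict.getD_eq_get?_getD, hget]; rfl
    simp [Function.comp, hgd]
  rw [this, List.map_id]

-- ===== VERDICT (by name: the statement is the Claim_ definition above) =====
theorem parse_language_targets_spec : Claim_equal_parse_language_targets := by
  intro targets _
  unfold Spec_parse_language_targets parse_language_targets parse_language_targets_alt
  show ((targets.foldl (fun language_targets target =>
      if PySem.Str.isIn ":" target then
        let language := (pvPair target).1
        let identifier := (pvPair target).2
        let d := if language_targets.contains language then language_targets
                 else language_targets.insert language []
        d.modify language [] (fun v => v ++ [identifier])
      else
        let d := if language_targets.contains "auto" then language_targets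
                 else language_targets.insert "auto" []
        d.modify "auto" [] (fun v => v ++ [target]))
      PySem.Dict.empty).items)
    = (PySem.List.dedup ((targets.map pvPair).map (fun p => p.1))).map
        (fun lang => (lang, ((targets.map pvPair).filter (fun p => p.1 == lang)).map (fun p => p.2)))
  have hbody : (fun (language_targets : PySem.Dict String (List String)) (target : String) =>
      if PySem.Str.isIn ":" target then
        let language := (pvPair target).1
        let identifier := (pvPair target).2
        let d := if language_targets.contains language then language_targets
                 else language_targets.insert language []
        d.modify language [] (fun v => v ++ [identifier])
      else
        let d := if language_targets.contains "auto" then language_targets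
                 else language_targets.insert "auto" []
        d.modify "auto" [] (fun v => v ++ [target]))
      = fun d t => d.modify (pvPair t).1 [] (fun v => v ++ [(pvPair t).2]) := by
    funext d t; exact pv_stepA_eq d t
  rw [hbody]
  have hfm : (targets.map pvPair).foldl (fun d p => d.modify p.1 [] (fun v => v ++ [p.2])) PySem.Dict.empty
      = targets.foldl (fun d t => d.modify (pvPair t).1 [] (fun v => v ++ [(pvPair t).2])) PySem.Dict.empty :=
    List.foldl_map
  rw [← hfm]
  have hnodup : (((targets.map pvPair).foldl (fun d p => d.modify p.1 [] (fun v => v ++ [p.2])) PySem.Dict.empty).keys).Nodup :=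
    PySem.Dict.nodup_keys_foldl_modify_key (targets.map pvPair) (fun p => p.1) [] (fun _ p => fun v => v ++ [p.2]) _
      (by simp)
  rw [pv_items_eq_keys_map _ ([] : List String) hnodup,
      PySem.Dict.keys_foldl_modify_key (targets.map pvPair) (fun p => p.1) [] (fun _ p => fun v => v ++ [p.2])]
  have hkeys : PySem.Set.update (PySem.Dict.empty : PySem.Dict String (List String)).keys ((targets.map pvPair).map (fun p => p.1))
      = PySem.List.dedup ((targets.map pvPair).map (fun p => p.1)) := by
    simp [PySem.Dict.keys_empty, PySem.Set.update_nil_left, PySem.List.dedup_eq_ofList]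
  rw [hkeys]
  apply List.map_congr_left
  intro k _
  rw [PySem.Dict.getD_foldl_modify_append (targets.map pvPair) PySem.Dict.empty k]
  simp [PySem.Dict.getD_empty]
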